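-- pv_equiv track=rewrite | github.com/lau9873/university | bachelor/Programação_python/CC1015_f4.py.py | divisivel_pot10
-- ===== SOURCE A (Python) =====
-- def divisivel_pot10(x:str,p:int) -> bool:
--     # admitir que não começa por zero se não for 0
--     if x == "0":
--         return True
--
--     n = len(x)
--     if n <= p:    # um número divisivel por 10^p tem de ter pelo menos p+1 digitos
--         return False
--
--     for i in range(n-p,n):     #n-p, n-p+1, ..., n-1
--         if x[i] != "0":
--             return False
--
--     return True
-- ===== SOURCE B (Python) =====
-- def divisivel_pot10(x: str, p: int) -> bool:
--     if x == "0":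
--         return True
--     t = len(x) - len(x.rstrip('0'))   # number of trailing zeros
--     return len(x) > p and t >= p
-- ===== Notes on version B (the rewrite author's own statement) =====
-- stated objective: simpler
-- what changed: Replaces the explicit index loop over the last p characters with a computed trailing-zero count (len(x) - len(x.rstrip('0'))) compared to p.
import Mathlib
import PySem

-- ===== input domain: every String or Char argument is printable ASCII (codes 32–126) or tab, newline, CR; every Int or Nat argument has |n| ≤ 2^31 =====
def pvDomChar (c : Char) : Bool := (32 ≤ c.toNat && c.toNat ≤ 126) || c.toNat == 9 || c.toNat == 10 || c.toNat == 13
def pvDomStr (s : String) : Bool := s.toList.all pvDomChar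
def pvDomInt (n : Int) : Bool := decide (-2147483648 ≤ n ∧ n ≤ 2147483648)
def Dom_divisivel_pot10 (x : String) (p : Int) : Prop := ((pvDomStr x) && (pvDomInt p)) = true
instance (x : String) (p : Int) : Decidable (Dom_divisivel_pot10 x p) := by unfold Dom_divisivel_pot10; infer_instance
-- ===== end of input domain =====

-- B replaces A's explicit index loop over the last p characters by a trailing-zero
-- count (len(x) - len(x.rstrip('0'))) compared to p: a simpler, loop-free decomposition.


-- ===== PORT A =====
-- A's for-loop over range(n-p, n): early-return False on a non-'0' character.
-- (the 'none' branch is unreachable: every generated index is in range)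
def pvALoop (xs : List Char) (idxs : List Int) : Bool :=
  match idxs with
  | [] => true
  | i :: rest =>
    match PySem.List.pyGet? xs i with
    | some c => if !(c == '0') then false else pvALoop xs rest
    | none => false

def divisivel_pot10 (x : String) (p : Int) : Bool :=
  if x == "0" then true
  else
    let n : Int := (x.toList.length : Int)
    if n ≤ p then false
    else pvALoop x.toList (PySem.List.pyRange (n - p) n 1)

-- ===== PORT B =====
def divisivel_pot10_alt (x : String) (p : Int) : Bool :=
  if x == "0" then true
  else
    let xs := x.toList
    -- t = len(x) - len(x.rstrip('0'))
    let t : Int := (xs.length : Int) - (((xs.reverse.dropWhile (· == '0')).reverse).length : Int)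
    decide ((xs.length : Int) > p) && decide (t ≥ p)

-- ===== PRECONDITION & SPEC =====
def Spec_divisivel_pot10 (x : String) (p : Int) (out : Bool) : Prop := out = divisivel_pot10_alt x p
instance (x : String) (p : Int) (out : Bool) : Decidable (Spec_divisivel_pot10 x p out) := by unfold Spec_divisivel_pot10; infer_instance

-- ===== CLAIM (what is proved, stated in full; the proofs are below) =====
def Claim_equal_divisivel_pot10 : Prop := ∀ (x : String) (p : Int), Dom_divisivel_pot10 x p → Spec_divisivel_pot10 x p (divisivel_pot10 x p)

-- ===== LEMMAS AND PROOFS =====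

-- A's loop over range(a, n) equals "all characters from position a on are '0'".
theorem pvALoop_range (xs : List Char) (a : Int) (ha : 0 ≤ a) :
    pvALoop xs (PySem.List.pyRange a (xs.length : Int) 1) =
      (xs.drop a.toNat).all (· == '0') := by
  obtain ⟨k, hk⟩ : ∃ k, xs.length - a.toNat = k := ⟨_, rfl⟩
  induction k generalizing a with
  | zero =>
    have hge : (xs.length : Int) ≤ a := by omega
    rw [PySem.List.pyRange_one_eq_nil hge, List.drop_eq_nil_of_le (by omega)]
    rfl
  | succ k ih =>
    have hlt : a < (xs.length : Int) := by omega
    rw [PySem.List.pyRange_one_cons hlt]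
    have hidx : a.toNat < xs.length := by omega
    have hget : PySem.List.pyGet? xs a = some xs[a.toNat] :=
      PySem.List.pyGet?_eq_some_getElem _ ha hlt
    have hdrop : xs.drop a.toNat = xs[a.toNat] :: xs.drop (a.toNat + 1) :=
      List.drop_eq_getElem_cons hidx
    have hrec := ih (a + 1) (by omega) (by omega)
    have ha1 : (a + 1).toNat = a.toNat + 1 := by omega
    rw [ha1] at hrec
    simp only [pvALoop, hget, hdrop, List.all_cons, hrec]
    by_cases hc : xs[a.toNat] == '0' <;> simp [hc]

-- take m all-P  ↔  m ≤ length of takeWhile P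
theorem take_all_iff_takeWhile (P : Char → Bool) (ys : List Char) (m : Nat)
    (hm : m ≤ ys.length) :
    (ys.take m).all P = decide (m ≤ (ys.takeWhile P).length) := by
  induction ys generalizing m with
  | nil =>
    have : m = 0 := by simpa using hm
    subst this
    simp
  | cons c ys ih =>
    cases m with
    | zero => simp
    | succ m =>
      have hm' : m ≤ ys.length := by simpa using hm
      by_cases hc : P c
      · simp [hc, ih m hm']
      · simp [hc]

-- ===== VERDICT (by name: the statement is the Claim_ definition above) =====
theorem divisivel_pot10_spec : Claim_equal_divisivel_pot10 := by
  intro x p _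
  unfold Spec_divisivel_pot10 divisivel_pot10 divisivel_pot10_alt
  by_cases h0 : x == "0"
  · simp [h0]
  · simp only [h0, Bool.false_eq_true, if_false]
    set xs := x.toList with hxs
    by_cases hle : (xs.length : Int) ≤ p
    · simp [hle, show ¬ ((xs.length : Int) > p) from by omega]
    · have hgt : (xs.length : Int) > p := by omega
      simp only [hle, if_false]
      rw [pvALoop_range xs ((xs.length : Int) - p) (by omega)]
      rw [← List.all_reverse, List.reverse_drop]
      have hm : xs.length - ((xs.length : Int) - p).toNat ≤ xs.reverse.length := by
        simp
      rw [take_all_iff_takeWhile (· == '0') xs.reverse _ hm]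
      have hlen : (xs.reverse.takeWhile (· == '0')).length
          + (xs.reverse.dropWhile (· == '0')).length = xs.length := by
        have h2 := congrArg List.length
          (List.takeWhile_append_dropWhile (p := (· == '0')) (l := xs.reverse))
        simp only [List.length_append, List.length_reverse] at h2
        omega
      simp only [List.length_reverse, hgt, decide_true, Bool.true_and,
        decide_eq_decide]
      omega
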